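-- pv_equiv track=rewrite | github.com/ERR0RW0LF/MYCODE | excel/Rechner/form_automation.py | generate_formulas
-- ===== SOURCE A (Python) =====
-- def generate_formulas(bits:int, row:int, lowest:str, highest:str):
--     formulas = []
--     for i in range(2**bits):
--         formula = '=GANZZAHL(UND('
--         for j in range(bits):
--             # Calculate the column letter(s)
--             column = ''
--             temp = j
--             while temp >= 0:
--                 column = chr(ord('A') + temp % 26) + column
--                 temp = temp // 26 - 1
--
--             if i & (1 << j):
--                 formula += column + str(row) + ';'
--             else:
--                 formula += 'NICHT(' + column + str(row) + ');'
--         formula = formula[:-1] + '))'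
--         formulas.append(formula)
--     return formulas
-- ===== SOURCE B (Python) =====
-- def generate_formulas(bits: int, row: int, lowest: str, highest: str):
--     def col(j):
--         # bijective base-26 column name for 0-based index j
--         s = ''
--         j += 1
--         while j > 0:
--             j, r = divmod(j - 1, 26)
--             s = chr(65 + r) + s
--         return s
--     options = [('NICHT(' + col(j) + str(row) + ');', col(j) + str(row) + ';')
--                for j in range(bits)]
--     bodies = ['']
--     for off, on in options:
--         bodies = [b + off for b in bodies] + [b + on for b in bodies]
--     return [('=GANZZAHL(UND(' + b)[:-1] + '))' for b in bodies]
-- ===== Notes on version B (the rewrite author's own statement) =====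
-- stated objective: alternative
-- what changed: Instead of looping over all 2**bits integers and re-deriving each column term by bit-masking and a per-cell column-letter loop, B precomputes the two candidate terms per column once and builds all formula bodies by a doubling fold (each column maps the body list to without-bit copies followed by with-bit copies), which also reuses each column string 2**bits times instead of recomputing it.
import Mathlib
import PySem

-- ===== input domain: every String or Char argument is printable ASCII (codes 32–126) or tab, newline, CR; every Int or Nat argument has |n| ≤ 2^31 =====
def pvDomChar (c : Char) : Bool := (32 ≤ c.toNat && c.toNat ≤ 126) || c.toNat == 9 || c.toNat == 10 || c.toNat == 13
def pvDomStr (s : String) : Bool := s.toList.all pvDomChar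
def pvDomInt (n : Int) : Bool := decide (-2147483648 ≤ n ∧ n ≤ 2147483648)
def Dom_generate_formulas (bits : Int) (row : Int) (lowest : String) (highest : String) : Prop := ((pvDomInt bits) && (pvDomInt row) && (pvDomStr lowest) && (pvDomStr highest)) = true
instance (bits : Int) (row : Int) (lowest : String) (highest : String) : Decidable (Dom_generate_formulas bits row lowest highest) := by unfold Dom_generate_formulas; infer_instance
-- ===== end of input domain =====

-- B replaces A's loop over all 2**bits integers with per-column precomputed terms and a
-- doubling fold over the columns (objective: alternative; same results wherever A returns).

-- ===== PORT A =====
-- the inner 'while temp >= 0' loop building the column letters (strings as List Char)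
def pvColA (temp : Int) (column : List Char) : List Char :=
  if h : 0 ≤ temp then
    pvColA (PySem.Int.floordiv temp 26 - 1)
      (Char.ofNat (65 + (PySem.Int.mod temp 26)).toNat :: column)
  else column
termination_by (temp + 1).toNat
decreasing_by
  rw [PySem.Int.floordiv_eq_ediv_of_pos (by norm_num)]
  have h1 : temp / 26 ≤ temp := Int.ediv_le_self 26 h
  have h2 : 0 ≤ temp / 26 := Int.ediv_nonneg h (by norm_num)
  omega

def generate_formulas (bits : Int) (row : Int) (lowest : String) (highest : String) : List String :=
  -- Python raises TypeError when bits < 0 (2**bits is a float, range rejects it): excluded by Pre_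
  if bits < 0 then [] else
  (PySem.List.pyRange 0 ((2 : Int) ^ bits.toNat) 1).foldl (fun formulas i =>
    let formula : List Char := "=GANZZAHL(UND(".toList
    let formula := (PySem.List.pyRange 0 bits 1).foldl (fun formula j =>
      let column := pvColA j []
      -- i & (1 << j): PySem.Int.band; j ≥ 0 here, so 1 << j is 1 <<< j.toNat
      if PySem.Int.band i (1 <<< j.toNat) ≠ 0 then
        formula ++ column ++ (PySem.Int.toStr row).toList ++ [';']
      else
        formula ++ "NICHT(".toList ++ column ++ (PySem.Int.toStr row).toList ++ [')', ';']) formula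
    formulas ++ [String.ofList (PySem.List.slice formula none (some (-1)) ++ [')', ')'])]) []

-- ===== PORT B =====
-- B's column helper: j += 1; while j > 0: j, r = divmod(j - 1, 26); s = chr(65 + r) + s
def pvColBLoop (j : Int) (s : List Char) : List Char :=
  if h : 0 < j then
    pvColBLoop (PySem.Int.floordiv (j - 1) 26)
      (Char.ofNat (65 + (PySem.Int.mod (j - 1) 26)).toNat :: s)
  else s
termination_by j.toNat
decreasing_by
  rw [PySem.Int.floordiv_eq_ediv_of_pos (by norm_num)]
  have h1 : (j - 1) / 26 ≤ j - 1 := Int.ediv_le_self 26 (by omega)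
  have h2 : 0 ≤ (j - 1) / 26 := Int.ediv_nonneg (by omega) (by norm_num)
  omega

def pvColB (j : Int) : List Char := pvColBLoop (j + 1) []

def generate_formulas_alt (bits : Int) (row : Int) (lowest : String) (highest : String) : List String :=
  let options := (PySem.List.pyRange 0 bits 1).map (fun j =>
    ("NICHT(".toList ++ pvColB j ++ (PySem.Int.toStr row).toList ++ [')', ';'],
     pvColB j ++ (PySem.Int.toStr row).toList ++ [';']))
  let bodies := options.foldl (fun bodies p =>
    bodies.map (· ++ p.1) ++ bodies.map (· ++ p.2)) [([] : List Char)]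
  bodies.map (fun b =>
    String.ofList (PySem.List.slice ("=GANZZAHL(UND(".toList ++ b) none (some (-1)) ++ [')', ')']))

-- ===== PRECONDITION & SPEC =====
-- Pre_ excludes exactly bits < 0, where Python A raises TypeError (range(2**bits) on a float).
def Pre_generate_formulas (bits : Int) (row : Int) (lowest : String) (highest : String) : Prop :=
  0 ≤ bits
instance (bits : Int) (row : Int) (lowest : String) (highest : String) : Decidable (Pre_generate_formulas bits row lowest highest) := by unfold Pre_generate_formulas; infer_instance
def pvWitness_generate_formulas : Int × Int × String × String := (2, 5, "", "")

def Spec_generate_formulas (bits : Int) (row : Int) (lowest : String) (highest : String) (out : List String) : Prop := out = generate_formulas_alt bits row lowest highest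
instance (bits : Int) (row : Int) (lowest : String) (highest : String) (out : List String) : Decidable (Spec_generate_formulas bits row lowest highest out) := by unfold Spec_generate_formulas; infer_instance

-- ===== CLAIM (what is proved, stated in full; the proofs are below) =====
def Claim_equal_generate_formulas : Prop := ∀ (bits : Int) (row : Int) (lowest : String) (highest : String), Dom_generate_formulas bits row lowest highest → Pre_generate_formulas bits row lowest highest → Spec_generate_formulas bits row lowest highest (generate_formulas bits row lowest highest)
-- ===== LEMMAS AND PROOFS =====

theorem pvCol_eq (n : Nat) : ∀ acc : List Char, pvColA (n : Int) acc = pvColBLoop ((n : Int) + 1) acc := by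
  induction n using Nat.strong_induction_on with
  | _ n ih =>
    intro acc
    rw [pvColA, pvColBLoop, dif_pos (by positivity : (0:Int) ≤ (n:Int)),
      dif_pos (by positivity : (0:Int) < (n:Int) + 1)]
    have hsub : (n : Int) + 1 - 1 = (n : Int) := by ring
    rw [hsub]
    have hdiv : PySem.Int.floordiv (n : Int) 26 = ((n / 26 : Nat) : Int) := by
      rw [PySem.Int.floordiv_eq_ediv_of_pos (by norm_num)]; omega
    rw [hdiv]
    rcases Nat.eq_zero_or_pos (n / 26) with hq | hq
    · rw [hq, pvColA, pvColBLoop, dif_neg (by norm_num), dif_neg (by norm_num)]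
    · have h1 : ((n / 26 : Nat) : Int) - 1 = ((n / 26 - 1 : Nat) : Int) := by omega
      rw [h1, ih (n / 26 - 1) (by omega)]
      congr 1
      omega

def pvRowStr (row : Int) : List Char := (PySem.Int.toStr row).toList
def pvOff (row : Int) (j : Nat) : List Char := "NICHT(".toList ++ pvColB (j:Int) ++ pvRowStr row ++ [')', ';']
def pvOn (row : Int) (j : Nat) : List Char := pvColB (j:Int) ++ pvRowStr row ++ [';']
def pvTerm (row : Int) (i j : Nat) : List Char := if i.testBit j then pvOn row j else pvOff row j
def pvBody (row : Int) (n i : Nat) : List Char := (List.range n).flatMap (pvTerm row i)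
def pvBodiesSpec (row : Int) (n : Nat) : List (List Char) :=
  (List.range n).foldl (fun bodies j => bodies.map (· ++ pvOff row j) ++ bodies.map (· ++ pvOn row j)) [[]]
def pvFinish (b : List Char) : String :=
  String.ofList (PySem.List.slice ("=GANZZAHL(UND(".toList ++ b) none (some (-1)) ++ [')', ')'])

theorem pv_and_iff (m j : Nat) : (m &&& 2^j ≠ 0) ↔ m.testBit j := by
  rw [Nat.and_two_pow]; by_cases h : m.testBit j <;> simp [h]

theorem A_char (n : Nat) (row : Int) (l h : String) :
    generate_formulas (n : Int) row l h = (List.range (2^n)).map (fun i => pvFinish (pvBody row n i)) := by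
  unfold generate_formulas
  rw [if_neg (not_lt.mpr (by positivity))]
  have h2 : ((2:Int) ^ ((n:Int)).toNat) = ((2^n : Nat) : Int) := by
    rw [Int.toNat_natCast]; push_cast; ring
  rw [h2, PySem.List.pyRange_zero_nat, PySem.List.pyRange_zero_nat, List.foldl_map,
    PySem.List.foldl_append_singleton_eq_map]
  apply List.map_congr_left
  intro i _
  rw [List.foldl_map]
  have hfun : (fun (formula : List Char) (jN : Nat) =>
      let column := pvColA (jN : Int) []
      if PySem.Int.band (i:Int) (1 <<< ((jN:Int)).toNat) ≠ 0 then
        formula ++ column ++ (PySem.Int.toStr row).toList ++ [';']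
      else
        formula ++ "NICHT(".toList ++ column ++ (PySem.Int.toStr row).toList ++ [')', ';'])
      = (fun formula jN => formula ++ pvTerm row i jN) := by
    funext formula jN
    simp only [Int.toNat_natCast, PySem.Int.band_natCast]
    by_cases hb : i.testBit jN
    · rw [if_pos (by simpa [Nat.one_shiftLeft, pv_and_iff] using hb)]
      rw [show pvColA (jN:Int) [] = pvColB (jN:Int) from pvCol_eq jN []]
      simp [pvTerm, hb, pvOn, pvRowStr, List.append_assoc]
    · rw [if_neg (by simpa [Nat.one_shiftLeft, pv_and_iff] using hb)]
      rw [show pvColA (jN:Int) [] = pvColB (jN:Int) from pvCol_eq jN []]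
      simp [pvTerm, hb, pvOff, pvRowStr, List.append_assoc]
  rw [hfun, PySem.List.foldl_append_eq_flatMap]
  rfl

theorem B_char (n : Nat) (row : Int) (l h : String) :
    generate_formulas_alt (n:Int) row l h = (pvBodiesSpec row n).map pvFinish := by
  unfold generate_formulas_alt pvBodiesSpec pvFinish pvOff pvOn pvRowStr
  simp only [PySem.List.pyRange_zero_nat, List.map_map, List.foldl_map, Function.comp]

theorem pvBodies_eq (row : Int) (n : Nat) :
    pvBodiesSpec row n = (List.range (2^n)).map (pvBody row n) := by
  induction n with
  | zero => simp [pvBodiesSpec, pvBody]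
  | succ n ih =>
    rw [pvBodiesSpec, List.range_succ, List.foldl_append, List.foldl_cons, List.foldl_nil]
    rw [show (List.range n).foldl (fun bodies j => bodies.map (· ++ pvOff row j) ++ bodies.map (· ++ pvOn row j)) [[]] = pvBodiesSpec row n from rfl, ih]
    have hpow : 2^(n+1) = 2^n + 2^n := by rw [pow_succ]; ring
    rw [hpow, List.range_add, List.map_append, List.map_map, List.map_map]
    congr 1
    · apply List.map_congr_left
      intro i hi
      have hi' : i < 2^n := List.mem_range.mp hi
      simp only [Function.comp]
      rw [pvBody, pvBody, List.range_succ, List.flatMap_append, List.flatMap_cons, List.flatMap_nil]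
      rw [pvTerm, if_neg (by simp [Nat.testBit_lt_two_pow hi'])]
      simp
    · rw [List.map_map]
      apply List.map_congr_left
      intro i hi
      have hi' : i < 2^n := List.mem_range.mp hi
      simp only [Function.comp]
      rw [pvBody, pvBody, List.range_succ, List.flatMap_append, List.flatMap_cons, List.flatMap_nil]
      have ht : (2^n + i).testBit n = true := by
        rw [Nat.testBit_two_pow_add_eq, Nat.testBit_lt_two_pow hi']; rfl
      rw [pvTerm, if_pos ht]
      have hfl : (List.range n).flatMap (pvTerm row (2^n + i)) = (List.range n).flatMap (pvTerm row i) := by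
        apply List.flatMap_congr
        intro j hj
        rw [pvTerm, pvTerm, Nat.testBit_two_pow_add_gt (List.mem_range.mp hj)]
      rw [hfl]
      simp

theorem main_eq (bits row : Int) (l h : String) (hb : 0 ≤ bits) :
    generate_formulas bits row l h = generate_formulas_alt bits row l h := by
  obtain ⟨n, rfl⟩ := Int.eq_ofNat_of_zero_le hb
  rw [A_char, B_char, pvBodies_eq, List.map_map]
  rfl

-- ===== VERDICT (by name: the statement is the Claim_ definition above) =====
theorem generate_formulas_spec : Claim_equal_generate_formulas := by
  intro bits row lowest highest _ hpre
  exact main_eq bits row lowest highest hpre
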